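-- pv_equiv track=rewrite | github.com/guelfoweb/sentenza | sentenza.py | preprocess_for_sentence_splitting
-- ===== SOURCE A (Python) =====
-- def preprocess_for_sentence_splitting(text):
--     """
--     Preprocess text to handle abbreviations before sentence splitting.
--     """
--
--     # replace the dot in common abbreviations
--     common_abbr = {
--         'prof.': 'prof@POINT@',  # Professore
--         'dott.': 'dott@POINT@',  # Dottore
--         'sig.': 'sig@POINT@',    # Signore
--         'ing.': 'ing@POINT@',    # Ingegnere
--         'avv.': 'avv@POINT@',    # Avvocato
--         'dr.': 'dr@POINT@',      # Doctor
--         'mr.': 'mr@POINT@',      # Mister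
--         'mrs.': 'mrs@POINT@',    # Misses
--         'ms.': 'ms@POINT@',      # Miss
--         'eng.': 'eng@POINT@',    # Engineer
--         'esq.': 'esq@POINT@',    # Esquire
--         'rev.': 'rev@POINT@',    # Reverend
--     } # todo
--
--
--     for abbr, replacement in common_abbr.items():
--         text = text.replace(abbr, replacement)
--
--     return text
-- ===== SOURCE B (Python) =====
-- def preprocess_for_sentence_splitting(text):
--     """
--     Preprocess text to handle abbreviations before sentence splitting.
--     """
--
--     common_abbr = {
--         'prof.': 'prof@POINT@',
--         'dott.': 'dott@POINT@',
--         'sig.': 'sig@POINT@',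
--         'ing.': 'ing@POINT@',
--         'avv.': 'avv@POINT@',
--         'dr.': 'dr@POINT@',
--         'mr.': 'mr@POINT@',
--         'mrs.': 'mrs@POINT@',
--         'ms.': 'ms@POINT@',
--         'eng.': 'eng@POINT@',
--         'esq.': 'esq@POINT@',
--         'rev.': 'rev@POINT@',
--     }
--
--     # single left-to-right scan instead of 12 full-text replace passes
--     out = []
--     i = 0
--     n = len(text)
--     while i < n:
--         for abbr, replacement in common_abbr.items():
--             if text.startswith(abbr, i):
--                 out.append(replacement)
--                 i += len(abbr)
--                 break
--         else:
--             out.append(text[i])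
--             i += 1
--     return ''.join(out)
-- ===== Notes on version B (the rewrite author's own statement) =====
-- stated objective: alternative
-- what changed: Replaces the 12 sequential full-text str.replace passes with one single left-to-right scan that at each position tries the abbreviation table and emits either the replacement or the current character; correct because the keys are mutually overlap-free and replacements cannot create new matches.
import Mathlib
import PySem

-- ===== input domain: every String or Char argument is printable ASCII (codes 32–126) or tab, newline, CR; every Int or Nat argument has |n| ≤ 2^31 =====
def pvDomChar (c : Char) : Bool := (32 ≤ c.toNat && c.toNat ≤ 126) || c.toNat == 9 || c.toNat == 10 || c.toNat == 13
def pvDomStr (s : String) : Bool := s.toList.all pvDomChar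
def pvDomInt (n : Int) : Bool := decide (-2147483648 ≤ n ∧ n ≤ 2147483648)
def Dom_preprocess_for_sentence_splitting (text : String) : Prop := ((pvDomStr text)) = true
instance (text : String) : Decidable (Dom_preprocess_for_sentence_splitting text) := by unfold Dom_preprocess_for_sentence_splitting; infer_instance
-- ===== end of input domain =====

-- B replaces A's 12 sequential full-text replace passes with one left-to-right scan over the
-- characters that tries the abbreviation table at each position (objective: alternative algorithm).


-- ===== PORT A =====
-- A's dict literal
def pvCommonAbbr : PySem.Dict String String := PySem.Dict.ofList
  [("prof.", "prof@POINT@"), ("dott.", "dott@POINT@"), ("sig.", "sig@POINT@"),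
   ("ing.", "ing@POINT@"), ("avv.", "avv@POINT@"), ("dr.", "dr@POINT@"),
   ("mr.", "mr@POINT@"), ("mrs.", "mrs@POINT@"), ("ms.", "ms@POINT@"),
   ("eng.", "eng@POINT@"), ("esq.", "esq@POINT@"), ("rev.", "rev@POINT@")]

def preprocess_for_sentence_splitting (text : String) : String :=
  pvCommonAbbr.items.foldl (fun t p => PySem.Str.replace t p.1 p.2) text

-- ===== PORT B =====
-- the same table, on the character-list side (Source B iterates common_abbr.items())
def pvAbbrs : List (List Char × List Char) :=
  [("prof.".toList, "prof@POINT@".toList), ("dott.".toList, "dott@POINT@".toList),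
   ("sig.".toList, "sig@POINT@".toList), ("ing.".toList, "ing@POINT@".toList),
   ("avv.".toList, "avv@POINT@".toList), ("dr.".toList, "dr@POINT@".toList),
   ("mr.".toList, "mr@POINT@".toList), ("mrs.".toList, "mrs@POINT@".toList),
   ("ms.".toList, "ms@POINT@".toList), ("eng.".toList, "eng@POINT@".toList),
   ("esq.".toList, "esq@POINT@".toList), ("rev.".toList, "rev@POINT@".toList)]

-- the single left-to-right scan of Source B: at each position the first table entry whose key
-- starts here is emitted as its replacement (skipping the key), else the character is copied
def pvScan : List Char → List Char
  | [] => []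
  | c :: t =>
    match pvAbbrs.find? (fun p => p.1.isPrefixOf (c :: t)) with
    | some p => p.2 ++ pvScan (t.drop (p.1.length - 1))
    | none => c :: pvScan t
termination_by l => l.length
decreasing_by all_goals (simp only [List.length_drop, List.length_cons]; omega)

def preprocess_for_sentence_splitting_alt (text : String) : String :=
  String.ofList (pvScan text.toList)

-- ===== PRECONDITION & SPEC =====
def Spec_preprocess_for_sentence_splitting (text : String) (out : String) : Prop := out = preprocess_for_sentence_splitting_alt text
instance (text : String) (out : String) : Decidable (Spec_preprocess_for_sentence_splitting text out) := by unfold Spec_preprocess_for_sentence_splitting; infer_instance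

-- ===== CLAIM (what is proved, stated in full; the proofs are below) =====
def Claim_equal_preprocess_for_sentence_splitting : Prop := ∀ (text : String), Dom_preprocess_for_sentence_splitting text → Spec_preprocess_for_sentence_splitting text (preprocess_for_sentence_splitting text)

-- ===== LEMMAS AND PROOFS =====

-- fuel-free form of PySem.Chars.replace (for old ≠ []), the common ground of the proof
def pvRep (old new : List Char) : List Char → List Char
  | [] => []
  | c :: t =>
    if old.isPrefixOf (c :: t) then new ++ pvRep old new (t.drop (old.length - 1))
    else c :: pvRep old new t
termination_by l => l.length
decreasing_by all_goals (simp only [List.length_drop, List.length_cons]; omega)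

theorem pvScan_nil : pvScan [] = [] := by simp [pvScan]

theorem pvScan_cons (c : Char) (t : List Char) : pvScan (c :: t) =
    match pvAbbrs.find? (fun p => p.1.isPrefixOf (c :: t)) with
    | some p => p.2 ++ pvScan (t.drop (p.1.length - 1))
    | none => c :: pvScan t := by rw [pvScan]

theorem pvRep_nil (old new : List Char) : pvRep old new [] = [] := by
  simp [pvRep]

theorem pvRep_cons_pos (old new : List Char) (c : Char) (t : List Char)
    (h : old.isPrefixOf (c :: t)) :
    pvRep old new (c :: t) = new ++ pvRep old new (t.drop (old.length - 1)) := by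
  rw [pvRep]; simp [h]

theorem pvRep_cons_neg (old new : List Char) (c : Char) (t : List Char)
    (h : ¬ old.isPrefixOf (c :: t)) :
    pvRep old new (c :: t) = c :: pvRep old new t := by
  rw [pvRep]; simp [h]

theorem pvReplaceGo_eq (old new : List Char) (hold : old ≠ []) :
    ∀ (fuel : Nat) (s acc : List Char), s.length ≤ fuel →
      PySem.Chars.replace.go old new fuel s acc = acc.reverse ++ pvRep old new s := by
  intro fuel
  induction fuel with
  | zero =>
    intro s acc hs
    have hnil : s = [] := List.eq_nil_of_length_eq_zero (Nat.le_zero.mp hs)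
    subst hnil
    simp [PySem.Chars.replace.go, pvRep_nil]
  | succ n ih =>
    intro s acc hs
    cases s with
    | nil => simp [PySem.Chars.replace.go, pvRep_nil]
    | cons c t =>
      have hlen : 1 ≤ old.length := by
        cases old with
        | nil => exact absurd rfl hold
        | cons _ _ => simp
      by_cases hpre : old.isPrefixOf (c :: t)
      · have hdrop : (c :: t).drop old.length = t.drop (old.length - 1) := by
          cases old with
          | nil => exact absurd rfl hold
          | cons _ k' => simp
        have hrec : (t.drop (old.length - 1)).length ≤ n := by
          simp only [List.length_drop]
          simp only [List.length_cons] at hs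
          omega
        simp only [PySem.Chars.replace.go, hpre, if_true, hdrop]
        rw [ih _ _ hrec, pvRep_cons_pos old new c t hpre]
        simp
      · have hrec : t.length ≤ n := by
          simp only [List.length_cons] at hs
          omega
        simp only [PySem.Chars.replace.go, hpre]
        rw [ih _ _ hrec, pvRep_cons_neg old new c t hpre]
        simp
 
theorem pvReplace_eq (old new s : List Char) (hold : old ≠ []) :
    PySem.Chars.replace s old new = pvRep old new s := by
  have hemp : old.isEmpty = false := by
    cases old with | nil => exact absurd rfl hold | cons _ _ => rfl
  simp only [PySem.Chars.replace, hemp, Bool.false_eq_true, if_false]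
  simpa using pvReplaceGo_eq old new hold s.length s [] le_rfl

-- "pattern `old` can never match starting inside `a`, whatever follows `a`"
def pvSafe (a old : List Char) : Prop :=
  ∀ (m : Nat) (b : List Char), m < a.length → ¬ old <+: (a.drop m ++ b)

-- decidable criterion: at every start position inside `a` a character mismatch with `old`
-- happens while still inside `a`
def pvSafeB (a old : List Char) : Bool :=
  (List.range a.length).all (fun m =>
    (List.range old.length).any (fun i =>
      decide (m + i < a.length) && !(a[m + i]? == old[i]?)))

theorem pvSafe_of_pvSafeB (a old : List Char) (h : pvSafeB a old = true) : pvSafe a old := by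
  intro m b hm hpre
  have hm' := (List.all_eq_true.mp h) m (List.mem_range.mpr hm)
  obtain ⟨i, hi, hcond⟩ := List.any_eq_true.mp hm'
  have hi' : i < old.length := List.mem_range.mp hi
  rw [Bool.and_eq_true, decide_eq_true_iff, Bool.not_eq_eq_eq_not, Bool.not_true] at hcond
  obtain ⟨hlt, hne⟩ := hcond
  apply beq_eq_false_iff_ne.mp hne
  obtain ⟨u, hu⟩ := hpre
  have h1 : (a.drop m ++ b)[i]? = old[i]? := by
    rw [← hu, List.getElem?_append_left (by simpa using hi')]
  have h2 : (a.drop m ++ b)[i]? = a[m + i]? := by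
    rw [List.getElem?_append_left (by simp only [List.length_drop]; omega)]
    simp [List.getElem?_drop]
  rw [← h1, h2]

theorem pvRep_append (old new : List Char) :
    ∀ (a b : List Char), pvSafe a old → pvRep old new (a ++ b) = a ++ pvRep old new b := by
  intro a
  induction a with
  | nil => intro b _; simp
  | cons c a' ih =>
    intro b hsafe
    have hnp : ¬ old.isPrefixOf (c :: (a' ++ b)) := fun h =>
      hsafe 0 b (by simp) (by simpa using List.isPrefixOf_iff_prefix.mp h)
    simp only [List.cons_append]
    rw [pvRep_cons_neg _ _ _ _ hnp, ih b]
    intro m b' hm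
    exact hsafe (m + 1) b' (by simpa using Nat.succ_lt_succ hm)

theorem pvRep_head (old new b : List Char) (hold : old ≠ []) :
    pvRep old new (old ++ b) = new ++ pvRep old new b := by
  cases old with
  | nil => exact absurd rfl hold
  | cons k0 k' =>
    have hpre : (k0 :: k').isPrefixOf (k0 :: (k' ++ b)) :=
      List.isPrefixOf_iff_prefix.mpr ⟨b, by simp⟩
    have hdrop : (k' ++ b).drop ((k0 :: k').length - 1) = b := by
      simp
    simp only [List.cons_append]
    rw [pvRep_cons_pos _ _ _ _ hpre, hdrop]

-- a pair (key, replacement) of the table, abstractly: nonempty '@'-free key, '@' occurs in the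
-- replacement, and every '@'-free prefix of the replacement is a prefix of the key
def pvGood (p : List Char × List Char) : Prop :=
  p.1 ≠ [] ∧ (∀ c ∈ p.1, c ≠ '@') ∧ ('@' ∈ p.2) ∧
    (∀ n, n ≤ p.2.length → (∀ c ∈ p.2.take n, c ≠ '@') → p.2.take n = p.1.take n)

-- computable form of pvGood, so the 12 table instances can be checked by `decide`
def pvGoodB (p : List Char × List Char) : Bool :=
  (!p.1.isEmpty) && p.1.all (fun c => c != '@') && p.2.contains '@' &&
    (List.range (p.2.length + 1)).all (fun n =>
      !(p.2.take n).all (fun c => c != '@') || (p.2.take n == p.1.take n))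

theorem pvGood_of_pvGoodB (p : List Char × List Char) (h : pvGoodB p = true) : pvGood p := by
  rw [pvGoodB, Bool.and_eq_true, Bool.and_eq_true, Bool.and_eq_true] at h
  obtain ⟨⟨⟨h1, h2⟩, h3⟩, h4⟩ := h
  refine ⟨by simpa using h1, by simpa using h2, by simpa using h3, ?_⟩
  intro n hn hfree
  have h5 := List.all_eq_true.mp h4 n (List.mem_range.mpr (by omega))
  rw [Bool.or_eq_true] at h5
  rcases h5 with hA | hB
  · exfalso
    have h6 : (p.2.take n).all (fun c => c != '@') = true := by
      rw [List.all_eq_true]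
      intro c hc
      simpa using hfree c hc
    simp [h6] at hA
  · simpa using hB

-- replacing cannot create a new '@'-free prefix: any '@'-free prefix of the result was
-- already a prefix of the input
theorem pvPrefix_rep (old new : List Char) (hg : pvGood (old, new)) :
    ∀ (s p : List Char), (∀ c ∈ p, c ≠ '@') → p <+: pvRep old new s → p <+: s := by
  obtain ⟨hold, _hkey, hat, hpref⟩ := hg
  intro s
  induction s with
  | nil => intro p hp h; simpa [pvRep_nil] using h
  | cons c t ih =>
    intro p hp h
    by_cases hpre : old.isPrefixOf (c :: t)
    · rw [pvRep_cons_pos _ _ _ _ hpre] at h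
      by_cases hlen : p.length ≤ new.length
      · have hptake : p = (new ++ pvRep old new (t.drop (old.length - 1))).take p.length :=
          List.prefix_iff_eq_take.mp h
        have hp2 : p = new.take p.length := by
          conv_lhs => rw [hptake]
          rw [List.take_append_of_le_length hlen]
        have hpfree : ∀ c ∈ new.take p.length, c ≠ '@' := by
          rw [← hp2]; exact hp
        have hto : new.take p.length = old.take p.length := hpref p.length hlen hpfree
        have hpo : p <+: old := List.prefix_iff_eq_take.mpr (hp2.trans hto)
        exact hpo.trans (List.isPrefixOf_iff_prefix.mp hpre)
      · have hnp : new <+: p := by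
          rcases List.prefix_or_prefix_of_prefix h (List.prefix_append _ _) with h3 | h3
          · exact absurd h3.length_le (by omega)
          · exact h3
        exact absurd (hp '@' (hnp.subset hat)) (by simp)
    · rw [pvRep_cons_neg _ _ _ _ hpre] at h
      cases p with
      | nil => simp
      | cons pc pt =>
        rcases List.cons_prefix_cons.mp h with ⟨rfl, hpt⟩
        exact List.cons_prefix_cons.mpr
          ⟨rfl, ih pt (fun x hx => hp x (List.mem_cons_of_mem _ hx)) hpt⟩

-- the fold of A, after the passes are rewritten to pvRep
theorem pvFold_nil (ps : List (List Char × List Char)) :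
    ps.foldl (fun l p => pvRep p.1 p.2 l) [] = [] := by
  induction ps with
  | nil => rfl
  | cons p ps ih => simp [List.foldl_cons, pvRep_nil, ih]

-- if no key of the (good) pass list matches at the front, every pass keeps the first
-- character and none can create a front match afterwards
theorem pvFold_cons (c : Char) :
    ∀ (ps : List (List Char × List Char)) (w : List Char),
      (∀ p ∈ ps, pvGood p) → (∀ p ∈ ps, ¬ p.1 <+: (c :: w)) →
      ps.foldl (fun l p => pvRep p.1 p.2 l) (c :: w) = c :: ps.foldl (fun l p => pvRep p.1 p.2 l) w := by
  intro ps
  induction ps with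
  | nil => intro w _ _; rfl
  | cons p0 ps' ih =>
    intro w hg hnk
    have hg0 : pvGood p0 := hg p0 (by simp)
    have hnp : ¬ p0.1.isPrefixOf (c :: w) := fun h =>
      hnk p0 (by simp) (List.isPrefixOf_iff_prefix.mp h)
    simp only [List.foldl_cons]
    rw [pvRep_cons_neg _ _ _ _ hnp]
    apply ih
    · intro p hp; exact hg p (List.mem_cons_of_mem _ hp)
    · intro p hp hcontra
      have hgp : pvGood p := hg p (List.mem_cons_of_mem _ hp)
      obtain ⟨hne, hkeyat, _, _⟩ := hgp
      cases hpk : p.1 with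
      | nil => exact hne hpk
      | cons pc pt =>
        rw [hpk] at hcontra
        rcases List.cons_prefix_cons.mp hcontra with ⟨rfl, hpt⟩
        have hat : ∀ x ∈ pt, x ≠ '@' := fun x hx => by
          rw [hpk] at hkeyat
          exact hkeyat x (List.mem_cons_of_mem _ hx)
        have := pvPrefix_rep p0.1 p0.2 (by exact hg0) w pt hat hpt
        exact hnk p (List.mem_cons_of_mem _ hp)
          (by rw [hpk]; exact List.cons_prefix_cons.mpr ⟨rfl, this⟩)

-- passes slide over a prefix that is safe for all of their keys
theorem pvFold_append_safe :
    ∀ (ps : List (List Char × List Char)) (a w : List Char),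
      (∀ p ∈ ps, pvSafe a p.1) →
      ps.foldl (fun l p => pvRep p.1 p.2 l) (a ++ w) = a ++ ps.foldl (fun l p => pvRep p.1 p.2 l) w := by
  intro ps
  induction ps with
  | nil => intro a w _; rfl
  | cons p0 ps' ih =>
    intro a w hs
    simp only [List.foldl_cons]
    rw [pvRep_append p0.1 p0.2 a w (hs p0 (by simp))]
    exact ih a _ (fun p hp => hs p (List.mem_cons_of_mem _ hp))

-- the concrete table facts, checked by `decide` in Bool form
theorem pvGoodAll : ∀ p ∈ pvAbbrs, pvGood p := fun p hp =>
  pvGood_of_pvGoodB p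
    (List.all_eq_true.mp (by decide : pvAbbrs.all pvGoodB = true) p hp)

theorem pvSafeKeys : ∀ p ∈ pvAbbrs, ∀ q ∈ pvAbbrs, q.1 ≠ p.1 → pvSafeB p.1 q.1 = true := by
  have h : pvAbbrs.all (fun p => pvAbbrs.all (fun q => (q.1 == p.1) || pvSafeB p.1 q.1)) = true := by
    decide
  intro p hp q hq hne
  have h2 := List.all_eq_true.mp (List.all_eq_true.mp h p hp) q hq
  rw [Bool.or_eq_true] at h2
  rcases h2 with h3 | h3
  · exact absurd (by simpa using h3) hne
  · exact h3

theorem pvSafeReps : ∀ p ∈ pvAbbrs, ∀ q ∈ pvAbbrs, pvSafeB p.2 q.1 = true := by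
  have h : pvAbbrs.all (fun p => pvAbbrs.all (fun q => pvSafeB p.2 q.1)) = true := by decide
  intro p hp q hq
  exact List.all_eq_true.mp (List.all_eq_true.mp h p hp) q hq

-- the master lemma: A's 12 passes compute B's single scan
theorem pvMaster : ∀ (n : Nat) (l : List Char), l.length ≤ n →
    pvAbbrs.foldl (fun l p => pvRep p.1 p.2 l) l = pvScan l := by
  intro n
  induction n with
  | zero =>
    intro l hl
    have hnil : l = [] := List.eq_nil_of_length_eq_zero (Nat.le_zero.mp hl)
    subst hnil
    rw [pvFold_nil, pvScan_nil]
  | succ n ih =>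
    intro l hl
    cases l with
    | nil => rw [pvFold_nil, pvScan_nil]
    | cons c t =>
      cases hf : pvAbbrs.find? (fun p => p.1.isPrefixOf (c :: t)) with
      | none =>
        have hnk : ∀ p ∈ pvAbbrs, ¬ p.1 <+: (c :: t) := by
          intro p hp hcontra
          have := List.find?_eq_none.mp hf p hp
          simp [List.isPrefixOf_iff_prefix.mpr hcontra] at this
        rw [pvFold_cons c pvAbbrs t pvGoodAll hnk]
        rw [ih t (by simp only [List.length_cons] at hl; omega)]
        rw [pvScan_cons, hf]
      | some pr =>
        obtain ⟨hfx, pre, post, hEq, hpre_none⟩ := List.find?_eq_some_iff_append.mp hf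
        obtain ⟨k, r⟩ := pr
        have hkp : k <+: (c :: t) := List.isPrefixOf_iff_prefix.mp (by simpa using hfx)
        obtain ⟨rest, hrest⟩ := hkp
        have hmem : (k, r) ∈ pvAbbrs := by rw [hEq]; simp
        have hkne : k ≠ [] := (pvGoodAll _ hmem).1
        -- pre passes are safe over the prefix k
        have hsafe_pre : ∀ p ∈ pre, pvSafe k p.1 := by
          intro p hp
          have hpmem : p ∈ pvAbbrs := by rw [hEq]; exact List.mem_append_left _ hp
          have hne : p.1 ≠ k := by
            intro hcontra
            have hthis := hpre_none p hp
            rw [hcontra] at hthis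
            simp [List.isPrefixOf_iff_prefix.mpr ⟨rest, hrest⟩] at hthis
          exact pvSafe_of_pvSafeB _ _ (pvSafeKeys (k, r) hmem p hpmem hne)
        -- post passes are safe over the replacement r
        have hsafe_post : ∀ p ∈ post, pvSafe r p.1 := by
          intro p hp
          have hpmem : p ∈ pvAbbrs := by
            rw [hEq]; exact List.mem_append_right _ (List.mem_cons_of_mem _ hp)
          exact pvSafe_of_pvSafeB _ _ (pvSafeReps (k, r) hmem p hpmem)
        have hrestlen : rest.length ≤ n := by
          have h1 : k.length + rest.length = t.length + 1 := by
            have := congrArg List.length hrest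
            simpa using this
          have h2 : 1 ≤ k.length := by
            cases k with
            | nil => exact absurd rfl hkne
            | cons _ _ => simp
          simp only [List.length_cons] at hl
          omega
        calc pvAbbrs.foldl (fun l p => pvRep p.1 p.2 l) (c :: t)
            = (pre ++ (k, r) :: post).foldl (fun l p => pvRep p.1 p.2 l) (k ++ rest) := by
              rw [hEq, ← hrest]
          _ = post.foldl (fun l p => pvRep p.1 p.2 l)
                (pvRep k r (pre.foldl (fun l p => pvRep p.1 p.2 l) (k ++ rest))) := by
              simp [List.foldl_append]
          _ = post.foldl (fun l p => pvRep p.1 p.2 l)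
                (r ++ pvRep k r (pre.foldl (fun l p => pvRep p.1 p.2 l) rest)) := by
              rw [pvFold_append_safe pre k rest hsafe_pre, pvRep_head k r _ hkne]
          _ = r ++ post.foldl (fun l p => pvRep p.1 p.2 l)
                (pvRep k r (pre.foldl (fun l p => pvRep p.1 p.2 l) rest)) := by
              rw [pvFold_append_safe post r _ hsafe_post]
          _ = r ++ pvAbbrs.foldl (fun l p => pvRep p.1 p.2 l) rest := by
              rw [hEq]; simp [List.foldl_append]
          _ = r ++ pvScan rest := by rw [ih rest hrestlen]
          _ = pvScan (c :: t) := by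
              rw [pvScan_cons, hf]
              dsimp only
              have hdrop : t.drop (k.length - 1) = rest := by
                cases k with
                | nil => exact absurd rfl hkne
                | cons k0 k' =>
                  rw [List.cons_append] at hrest
                  injection hrest with h1 h2
                  rw [← h2]
                  simp
              rw [hdrop]
  
-- lift A's string-level fold to the character level
theorem pvFold_str (ps : List (String × String)) :
    ∀ (t : String), (∀ p ∈ ps, p.1 ≠ "") →
      (ps.foldl (fun t p => PySem.Str.replace t p.1 p.2) t).toList =
        (ps.map (fun p => (p.1.toList, p.2.toList))).foldl (fun l p => pvRep p.1 p.2 l) t.toList := by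
  induction ps with
  | nil => intro t _; rfl
  | cons p0 ps' ih =>
    intro t hne
    have h0 : p0.1 ≠ "" := hne p0 (by simp)
    have h0' : p0.1.toList ≠ [] := by
      intro hc
      exact h0 (String.toList_inj.mp (by simp [hc]))
    simp only [List.foldl_cons, List.map_cons]
    rw [ih _ (fun p hp => hne p (List.mem_cons_of_mem _ hp))]
    congr 1
    show (PySem.Str.replace t p0.1 p0.2).toList = pvRep p0.1.toList p0.2.toList t.toList
    simp only [PySem.Str.replace]
    rw [pvReplace_eq _ _ _ h0']
    simp

theorem pvItems : pvCommonAbbr.items.map (fun p => (p.1.toList, p.2.toList)) = pvAbbrs := by decide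

theorem pvItemsNe : ∀ p ∈ pvCommonAbbr.items, p.1 ≠ "" := by
  have h : pvCommonAbbr.items.all (fun p => !(p.1 == "")) = true := by decide
  intro p hp
  have h2 := List.all_eq_true.mp h p hp
  simpa using h2

-- ===== VERDICT (by name: the statement is the Claim_ definition above) =====
theorem preprocess_for_sentence_splitting_spec : Claim_equal_preprocess_for_sentence_splitting := by
  intro text _
  show preprocess_for_sentence_splitting text = preprocess_for_sentence_splitting_alt text
  have h : (preprocess_for_sentence_splitting text).toList =
      (preprocess_for_sentence_splitting_alt text).toList := by
    rw [preprocess_for_sentence_splitting, preprocess_for_sentence_splitting_alt]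
    rw [pvFold_str pvCommonAbbr.items text pvItemsNe, pvItems]
    rw [pvMaster text.toList.length text.toList le_rfl]
    simp
  exact String.toList_inj.mp h
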